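-- pv_equiv track=rewrite | github.com/Ainhoa2002/Tesis | Mass calculation/Pipeline.py | _ordered_result_fieldnames
-- ===== SOURCE A (Python) =====
-- def _ordered_result_fieldnames(row):
--     """Return result CSV field order with key visualization columns first."""
--     preferred_front = [
--         "Designators",
--         "Casing",
--         "Section",
--         "Subsection",
--         "Ecoinvent_unit",
--         "unit",
--         "Total_quantity",
--         "Ecoinvent_flow",
--     ]
--     fields = list(row.keys())
--     front = [name for name in preferred_front if name in fields]
--     tail = [name for name in fields if name not in front]
--     return front + tail
-- ===== SOURCE B (Python) =====
-- def _ordered_result_fieldnames(row):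
--     """Return result CSV field order with key visualization columns first."""
--     preferred_front = [
--         "Designators",
--         "Casing",
--         "Section",
--         "Subsection",
--         "Ecoinvent_unit",
--         "unit",
--         "Total_quantity",
--         "Ecoinvent_flow",
--     ]
--
--     def promote(prefs, fields):
--         # recursively promote each present preferred name to the front,
--         # processing the preferred list back-to-front
--         if not prefs:
--             return fields
--         head = prefs[0]
--         rest = promote(prefs[1:], fields)
--         if head in fields:
--             return [head] + [n for n in rest if n != head]
--         return rest
--
--     return promote(preferred_front, list(row.keys()))
-- ===== Notes on version B (the rewrite author's own statement) =====
-- stated objective: alternative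
-- what changed: Replaced A's two filter passes over the key list by a recursion over the preferred list that move-to-front promotes each present preferred name onto the recursively ordered remainder.
import Mathlib
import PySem

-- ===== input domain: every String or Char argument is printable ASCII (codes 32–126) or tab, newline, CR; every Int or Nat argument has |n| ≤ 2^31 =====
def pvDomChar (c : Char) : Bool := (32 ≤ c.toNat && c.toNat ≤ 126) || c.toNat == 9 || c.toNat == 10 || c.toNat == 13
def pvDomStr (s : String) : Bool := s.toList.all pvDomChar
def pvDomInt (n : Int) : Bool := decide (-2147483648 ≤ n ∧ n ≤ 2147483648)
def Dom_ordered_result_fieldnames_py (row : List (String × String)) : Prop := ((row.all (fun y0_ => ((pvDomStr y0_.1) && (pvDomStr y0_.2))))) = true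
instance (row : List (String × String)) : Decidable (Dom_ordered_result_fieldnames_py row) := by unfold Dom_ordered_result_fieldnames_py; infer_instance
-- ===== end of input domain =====

-- B replaces A's two filter passes by a recursion over the preferred list that
-- move-to-front promotes each present preferred name (alternative decomposition);
-- return values proved equal on all inputs.


-- ===== PORT A =====
-- row : dict → association list; list(row.keys()) = first occurrences of the keys, in order
def ordered_result_fieldnames_py (row : List (String × String)) : List String :=
  let preferred_front : List String :=
    ["Designators", "Casing", "Section", "Subsection",
     "Ecoinvent_unit", "unit", "Total_quantity", "Ecoinvent_flow"]
  let fields := PySem.List.dedup (row.map Prod.fst)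
  let front := preferred_front.filter (fun name => fields.contains name)
  let tail := fields.filter (fun name => !(front.contains name))
  front ++ tail

-- ===== PORT B =====
-- promote(prefs, fields): recursion on prefs; each present preferred name is
-- consed onto the recursively ordered remainder with its own occurrence removed
def pvPromote (prefs fields : List String) : List String :=
  match prefs with
  | [] => fields
  | head :: ps =>
    let rest := pvPromote ps fields
    if fields.contains head then head :: rest.filter (fun n => !(n == head)) else rest

def ordered_result_fieldnames_py_alt (row : List (String × String)) : List String :=
  pvPromote
    ["Designators", "Casing", "Section", "Subsection",
     "Ecoinvent_unit", "unit", "Total_quantity", "Ecoinvent_flow"]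
    (PySem.List.dedup (row.map Prod.fst))

-- ===== PRECONDITION & SPEC =====
def Spec_ordered_result_fieldnames_py (row : List (String × String)) (out : List String) : Prop := out = ordered_result_fieldnames_py_alt row
instance (row : List (String × String)) (out : List String) : Decidable (Spec_ordered_result_fieldnames_py row out) := by unfold Spec_ordered_result_fieldnames_py; infer_instance

-- ===== CLAIM (what is proved, stated in full; the proofs are below) =====
def Claim_equal_ordered_result_fieldnames_py : Prop := ∀ (row : List (String × String)), Dom_ordered_result_fieldnames_py row → Spec_ordered_result_fieldnames_py row (ordered_result_fieldnames_py row)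

-- ===== LEMMAS AND PROOFS =====

-- move-to-front promotion = (preferred names present, in preferred order) ++ (fields not preferred, in order)
theorem promote_eq (prefs fields : List String) (hnd : prefs.Nodup) :
    pvPromote prefs fields =
      prefs.filter (fun n => fields.contains n) ++ fields.filter (fun n => !(prefs.contains n)) := by
  induction prefs with
  | nil => simp [pvPromote]
  | cons p ps ih =>
    have hp : p ∉ ps := (List.nodup_cons.mp hnd).1
    have hps : ps.Nodup := (List.nodup_cons.mp hnd).2
    rw [pvPromote, ih hps]
    by_cases hpf : p ∈ fields
    · have hc : fields.contains p = true := by simpa using hpf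
      have h1 : (ps.filter (fun n => fields.contains n)).filter (fun n => !(n == p)) =
          ps.filter (fun n => fields.contains n) := by
        refine List.filter_eq_self.mpr (fun n hn => ?_)
        have hn' : n ∈ ps := (List.mem_filter.mp hn).1
        have : n ≠ p := fun h => hp (h ▸ hn')
        simp [this]
      have h2 : (fields.filter (fun n => !(ps.contains n))).filter (fun n => !(n == p)) =
          fields.filter (fun n => !((p :: ps).contains n)) := by
        rw [List.filter_filter]
        refine List.filter_congr (fun n _ => ?_)
        by_cases h : n = p <;> simp [h]
      rw [if_pos hc, List.filter_append, h1, h2, List.filter_cons_of_pos (by simpa using hpf)]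
      simp
    · have hc : fields.contains p = false := by simpa using hpf
      rw [if_neg (by simpa using hpf), List.filter_cons_of_neg (by simpa using hpf)]
      congr 1
      refine List.filter_congr (fun n hn => ?_)
      have : n ≠ p := fun h => hpf (h ▸ hn)
      simp [this]

-- A's tail test 'name not in front' coincides with 'name not in preferred_front' for names of fields
theorem tail_filter_eq (pf fields : List String) :
    fields.filter (fun n => !((pf.filter (fun m => fields.contains m)).contains n)) =
      fields.filter (fun n => !(pf.contains n)) := by
  refine List.filter_congr (fun n hn => ?_)
  by_cases h : n ∈ pf <;> simp [List.mem_filter, h, hn]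

theorem ports_agree (row : List (String × String)) :
    ordered_result_fieldnames_py row = ordered_result_fieldnames_py_alt row := by
  simp only [ordered_result_fieldnames_py, ordered_result_fieldnames_py_alt]
  rw [tail_filter_eq, promote_eq _ _ (by decide)]

-- ===== VERDICT (by name: the statement is the Claim_ definition above) =====
theorem ordered_result_fieldnames_py_spec : Claim_equal_ordered_result_fieldnames_py := by
  intro row _
  exact ports_agree row
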